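-- pv_equiv track=rewrite | github.com/nugongja/Algorithm | 프로그래머스/2/388352. 비밀 코드 해독/비밀 코드 해독.py | solution
-- ===== SOURCE A (Python) =====
-- import itertools
--
-- def solution(n, q, ans):
--     answer = 0
--
--     iterator = itertools.combinations(range(1, n+1),5)
--     for arr in iterator:
--         arr = list(arr)  # 튜플을 리스트로 변환
--         isPossiboe = True
--         for i in range(len(q)):
--             tmp = sum(1 for x in arr if x in q[i])
--             if tmp != ans[i]:
--                 isPossiboe = False
--                 break
--
--
--         if isPossiboe:
--             answer += 1
--
--
--     return answer
-- ===== SOURCE B (Python) =====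
-- def solution(n, q, ans):
--     # state: one (count, query, expected) triple per query (zip truncates; we
--     # require len(q) <= len(ans), where A would raise IndexError otherwise)
--     def rec(start, left, st):
--         if left == 0:
--             return 1 if all(c == a for c, _, a in st) else 0
--         total = 0
--         for v in range(start, n + 1):
--             new = [(c + (1 if v in qi else 0), qi, a) for c, qi, a in st]
--             if all(c <= a for c, _, a in new):
--                 total += rec(v + 1, left - 1, new)
--         return total
--
--     return rec(1, 5, [(0, qi, a) for qi, a in zip(q, ans)])
-- ===== Notes on version B (the rewrite author's own statement) =====
-- stated objective: alternative
-- what changed: Replaces enumerate-all-C(n,5)-combinations-then-validate with recursive backtracking that builds the increasing 5-sequence while maintaining incremental per-query match counts and prunes every branch whose running count already exceeds its target, skipping dead subtrees instead of enumerating them.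
-- outside the precondition, e.g. on solution(5, [[], [1]], [1]): A returns 0, B returns 0
import Mathlib
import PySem

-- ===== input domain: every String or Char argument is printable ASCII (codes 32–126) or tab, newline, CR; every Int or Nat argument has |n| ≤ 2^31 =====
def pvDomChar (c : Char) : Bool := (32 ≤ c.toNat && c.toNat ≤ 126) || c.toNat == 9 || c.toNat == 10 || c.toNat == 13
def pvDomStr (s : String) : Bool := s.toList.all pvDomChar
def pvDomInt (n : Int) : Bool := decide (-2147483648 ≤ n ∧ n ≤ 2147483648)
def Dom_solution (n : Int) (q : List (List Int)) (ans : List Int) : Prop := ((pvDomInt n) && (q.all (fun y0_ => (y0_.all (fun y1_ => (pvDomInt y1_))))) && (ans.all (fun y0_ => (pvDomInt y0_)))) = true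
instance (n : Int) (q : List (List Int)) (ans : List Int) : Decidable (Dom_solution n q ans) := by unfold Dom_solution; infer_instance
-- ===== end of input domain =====

-- B replaces A's enumerate-all-combinations-then-validate by incremental
-- backtracking with per-query running counts and pruning; equal return values.

-- ===== PORT A =====
-- itertools.combinations(range(1,n+1), 5): all 5-element subsequences, lexicographic
def combosA : Nat → List Int → List (List Int)
  | 0, _ => [[]]
  | _ + 1, [] => []
  | k + 1, x :: xs => ((combosA k xs).map (fun c => x :: c)) ++ combosA (k + 1) xs

-- tmp = sum(1 for x in arr if x in q[i])
def matchCount (qi : List Int) (arr : List Int) : Int :=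
  ((arr.countP (fun x => qi.contains x) : Nat) : Int)

-- the 'for i in range(len(q))' validation loop with its break
def aIsPoss (q : List (List Int)) (ans : List Int) (arr : List Int) : List Nat → Bool
  | [] => true
  | i :: rest =>
    if some (matchCount (q.getD i []) arr) != PySem.List.pyGet? ans (i : Int) then false
    else aIsPoss q ans arr rest

def solution (n : Int) (q : List (List Int)) (ans : List Int) : Int :=
  (combosA 5 (PySem.List.pyRange 1 (n + 1) 1)).foldl
    (fun answer arr => if aIsPoss q ans arr (List.range q.length) then answer + 1 else answer) 0

-- ===== PORT B =====
-- new = [(c + (1 if v in qi else 0), qi, a) for c, qi, a in st]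
def bStep (v : Int) (st : List (Int × List Int × Int)) : List (Int × List Int × Int) :=
  st.map (fun t => (t.1 + (if t.2.1.contains v then 1 else 0), t.2.1, t.2.2))

def bRec (n : Int) : Int → Nat → List (Int × List Int × Int) → Int
  | _, 0, st => if st.all (fun t => t.1 == t.2.2) then 1 else 0
  | start, left + 1, st =>
    (PySem.List.pyRange start (n + 1) 1).foldl
      (fun total v =>
        let new := bStep v st
        if new.all (fun t => t.1 ≤ t.2.2) then total + bRec n (v + 1) left new else total) 0

def solution_alt (n : Int) (q : List (List Int)) (ans : List Int) : Int :=
  bRec n 1 5 ((q.zip ans).map (fun p => (0, p.1, p.2)))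

-- ===== PRECONDITION & SPEC =====
-- Pre_ excludes inputs with fewer answers than queries AND n ≥ 5: there A's
-- validation loop raises IndexError whenever some combination matches all the
-- listed answers (with n < 5 there is no combination, so A is kept; on the
-- excluded inputs A sometimes still returns, when every combination already
-- fails on a listed answer; see cites).
def Pre_solution (n : Int) (q : List (List Int)) (ans : List Int) : Prop :=
  q.length ≤ ans.length ∨ n < 5
instance (n : Int) (q : List (List Int)) (ans : List Int) : Decidable (Pre_solution n q ans) := by
  unfold Pre_solution; infer_instance

def pvWitness_solution : Int × List (List Int) × List Int := (6, [[1, 2, 3, 4, 5]], [4])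

def Spec_solution (n : Int) (q : List (List Int)) (ans : List Int) (out : Int) : Prop :=
  out = solution_alt n q ans
instance (n : Int) (q : List (List Int)) (ans : List Int) (out : Int) : Decidable (Spec_solution n q ans out) := by
  unfold Spec_solution; infer_instance

-- ===== CLAIM (what is proved, stated in full; the proofs are below) =====
def Claim_equal_solution : Prop := ∀ (n : Int) (q : List (List Int)) (ans : List Int), Dom_solution n q ans → Pre_solution n q ans → Spec_solution n q ans (solution n q ans)

-- ===== LEMMAS AND PROOFS =====

-- B's state after scanning the whole chosen combination arr
def extB (st : List (Int × List Int × Int)) (arr : List Int) : List (Int × List Int × Int) :=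
  arr.foldl (fun s v => bStep v s) st

def finalOK (st : List (Int × List Int × Int)) : Bool := st.all (fun t => t.1 == t.2.2)

def boundOK (st : List (Int × List Int × Int)) : Bool := st.all (fun t => t.1 ≤ t.2.2)

lemma finalOK_extB (arr : List Int) : ∀ st,
    finalOK (extB st arr) = st.all (fun t => t.1 + matchCount t.2.1 arr == t.2.2) := by
  induction arr with
  | nil =>
    intro st
    simp [extB, finalOK, matchCount]
  | cons v arr ih =>
    intro st
    show finalOK (extB (bStep v st) arr) = _
    rw [ih]
    simp only [bStep, List.all_map]
    refine List.all_congr rfl ?_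
    intro t
    simp only [Function.comp_apply]
    refine congrArg (fun z => z == t.2.2) ?_
    simp only [matchCount, List.countP_cons]
    push_cast
    split <;> simp <;> ring

-- the pruning test is conservative: a state that can still succeed passes it
lemma boundOK_of_finalOK_extB (arr : List Int) : ∀ st,
    finalOK (extB st arr) = true → boundOK st = true := by
  induction arr with
  | nil =>
    intro st h
    simp only [extB, List.foldl_nil] at h
    simp only [finalOK, boundOK, List.all_eq_true] at h ⊢
    intro t ht
    have := h t ht
    simp at this ⊢
    omega
  | cons v arr ih =>
    intro st h
    have h2 := ih (bStep v st) h
    simp only [boundOK, bStep, List.all_map, List.all_eq_true] at h2 ⊢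
    intro t ht
    have := h2 t ht
    simp at this ⊢
    split at this <;> omega

lemma foldl_shift (f : Int → Int → Int) (hf : ∀ c v, f c v = c + f 0 v) :
    ∀ (L : List Int) (c : Int), L.foldl f c = c + L.foldl f 0 := by
  intro L
  induction L with
  | nil => simp
  | cons v L ih =>
    intro c
    simp only [List.foldl_cons]
    rw [ih (f c v), ih (f 0 v), hf c v]
    ring

lemma bRec_unfold (n start : Int) (left : Nat) (st : List (Int × List Int × Int)) :
    bRec n start (left + 1) st =
      (PySem.List.pyRange start (n + 1) 1).foldl
        (fun total v =>
          let new := bStep v st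
          if new.all (fun t => t.1 ≤ t.2.2) then total + bRec n (v + 1) left new else total) 0 := rfl

-- B's backtracking counts exactly the suffix combinations whose final state passes
lemma bRec_eq_countP (n : Int) : ∀ (left : Nat) (start : Int) (st : List (Int × List Int × Int)),
    bRec n start left st =
      (((combosA left (PySem.List.pyRange start (n + 1) 1)).countP
        (fun c => finalOK (extB st c)) : Nat) : Int) := by
  intro left
  induction left with
  | zero =>
    intro start st
    show (if finalOK st then (1:Int) else 0) = _
    simp only [combosA, List.countP_cons, List.countP_nil, extB, List.foldl_nil]
    split <;> simp_all
  | succ left ih =>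
    intro start st
    have H : ∀ (k : Nat) (start : Int) (st : List (Int × List Int × Int)),
        (n + 1 - start).toNat = k →
        bRec n start (left + 1) st =
          (((combosA (left + 1) (PySem.List.pyRange start (n + 1) 1)).countP
            (fun c => finalOK (extB st c)) : Nat) : Int) := by
      intro k
      induction k with
      | zero =>
        intro start st hk
        have hs : n + 1 ≤ start := by omega
        rw [bRec_unfold, PySem.List.pyRange_one_eq_nil hs]
        simp [combosA]
      | succ k ihk =>
        intro start st hk
        have hs : start < n + 1 := by omega
        rw [bRec_unfold, PySem.List.pyRange_one_cons hs]
        simp only [List.foldl_cons]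
        rw [foldl_shift _ (by intro c v; show (if _ then _ else _) = _; split <;> simp_all)]
        rw [← bRec_unfold, ihk (start + 1) st (by omega)]
        simp only [combosA, List.countP_append, List.countP_map]
        have hmap : ((combosA left (PySem.List.pyRange (start+1) (n+1) 1)).countP
            ((fun c => finalOK (extB st c)) ∘ (fun c => start :: c)))
            = (combosA left (PySem.List.pyRange (start+1) (n+1) 1)).countP
              (fun c => finalOK (extB (bStep start st) c)) := rfl
        rw [hmap]
        by_cases hb : (bStep start st).all (fun t => t.1 ≤ t.2.2)
        · simp only [hb, if_true]
          rw [ih (start + 1) (bStep start st)]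
          push_cast
          ring
        · simp only [hb]
          have hz : (combosA left (PySem.List.pyRange (start+1) (n+1) 1)).countP
              (fun c => finalOK (extB (bStep start st) c)) = 0 := by
            apply List.countP_eq_zero.mpr
            intro c _ hc
            exact hb (boundOK_of_finalOK_extB c (bStep start st) hc)
          rw [hz]
          push_cast
          simp
    exact H (n + 1 - start).toNat start st rfl

-- A's break-out validation loop is the 'all' of its per-index tests
lemma aIsPoss_eq_all (q : List (List Int)) (ans : List Int) (arr : List Int) :
    ∀ L, aIsPoss q ans arr L =
      L.all (fun i => some (matchCount (q.getD i []) arr) == PySem.List.pyGet? ans (i : Int)) := by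
  intro L
  induction L with
  | nil => rfl
  | cons i rest ih =>
    show (if _ then _ else _) = _
    rw [List.all_cons, ← ih]
    rcases h : (some (matchCount (q.getD i []) arr) == PySem.List.pyGet? ans (i : Int)) with _ | _ <;>
      simp only [bne, h, Bool.not_false, Bool.not_true, if_true, Bool.false_and, Bool.false_eq_true,
        ite_false, Bool.true_and]

-- index-based iteration over q/ans = iteration over their zip (needs len q ≤ len ans)
lemma range_all_eq_zip (arr : List Int) :
    ∀ (q : List (List Int)) (ans : List Int), q.length ≤ ans.length →
      ((List.range q.length).all
        (fun i => some (matchCount (q.getD i []) arr) == PySem.List.pyGet? ans (i : Int)))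
      = (q.zip ans).all (fun p => matchCount p.1 arr == p.2) := by
  intro q
  induction q with
  | nil => intro ans _; rfl
  | cons q0 qt ih =>
    intro ans hlen
    cases ans with
    | nil => simp at hlen
    | cons a at_ =>
      simp only [List.length_cons, List.range_succ_eq_map, List.all_cons, List.all_map]
      rw [List.zip_cons_cons, List.all_cons]
      congr 1
      · simp
      · rw [← ih at_ (by simpa using hlen)]
        refine List.all_congr rfl ?_
        intro i
        simp only [Function.comp_apply, List.getD_cons_succ]
        congr 1
        rw [show ((i + 1 : Nat) : Int) = ((i : Nat) : Int) + 1 by push_cast; ring,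
          PySem.List.pyGet?_cons_succ]

lemma combosA_eq_nil : ∀ (xs : List Int) (k : Nat), xs.length < k + 1 → combosA (k + 1) xs = [] := by
  intro xs
  induction xs with
  | nil => intro k _; rfl
  | cons x xs ih =>
    intro k h
    cases k with
    | zero => simp at h
    | succ k =>
      show (combosA (k + 1) xs).map _ ++ combosA (k + 2) xs = []
      rw [ih k (by simpa using h), ih (k + 1) (by simp at h ⊢; omega)]
      rfl

-- ===== VERDICT (by name: the statement is the Claim_ definition above) =====
theorem solution_spec : Claim_equal_solution := by
  intro n q ans _ hpre
  unfold Spec_solution solution solution_alt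
  rw [PySem.List.foldl_if_add_one, bRec_eq_countP, zero_add]
  rcases hpre with hpre | hn
  case inr =>
    -- n < 5: range(1, n+1) has fewer than 5 elements, so there is no combination
    have hnil : combosA 5 (PySem.List.pyRange 1 (n + 1) 1) = [] := by
      apply combosA_eq_nil
      rw [PySem.List.length_pyRange_one]
      omega
    rw [hnil]
    rfl
  congr 1
  apply List.countP_congr
  intro arr _
  have heq : aIsPoss q ans arr (List.range q.length)
      = finalOK (extB ((q.zip ans).map fun p => (0, p.1, p.2)) arr) := by
    rw [aIsPoss_eq_all, range_all_eq_zip arr q ans hpre, finalOK_extB, List.all_map]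
    refine List.all_congr rfl ?_
    intro p
    simp only [Function.comp_apply]
    congr 1
    ring
  rw [heq]
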